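-- pv_equiv track=rewrite | github.com/Vijtus/ElectricChair | app/bridge/state.py | _expand_cumulative_level_layers_locked
-- ===== SOURCE A (Python) =====
-- def _expand_cumulative_level_layers_locked(visible: set[str]) -> set[str]:
--     expanded = set(visible)
--     for prefix in (
--         "Sila_nacisku-LVL",
--         "Predkosc-LVL",
--         "Predkosc_masazu_stop-LVL",
--     ):
--         for level in range(3, 0, -1):
--             label = f"{prefix}{level}"
--             if label in expanded:
--                 for fill in range(1, level):
--                     expanded.add(f"{prefix}{fill}")
--     return expanded
-- ===== SOURCE B (Python) =====
-- _PREFIXES = (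
--     "Sila_nacisku-LVL",
--     "Predkosc-LVL",
--     "Predkosc_masazu_stop-LVL",
-- )
--
-- # Trigger index: label -> (prefix, level) for the levels that imply lower layers.
-- _TRIGGERS = {f"{p}{lvl}": (p, lvl) for p in _PREFIXES for lvl in (2, 3)}
--
--
-- def _expand_cumulative_level_layers_locked(visible: set[str]) -> set[str]:
--     # One pass over the input against the precomputed trigger index: record the
--     # highest triggering level seen per prefix (order-independent), then fill.
--     top = {}
--     for label in visible:
--         hit = _TRIGGERS.get(label)
--         if hit is not None:
--             p, lvl = hit
--             if lvl > top.get(p, 0):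
--                 top[p] = lvl
--     expanded = set(visible)
--     for p in _PREFIXES:
--         for fill in range(1, top.get(p, 0)):
--             expanded.add(f"{p}{fill}")
--     return expanded
-- ===== Notes on version B (the rewrite author's own statement) =====
-- stated objective: alternative
-- what changed: Replaces A's descending membership-test-and-fill nested loops over the growing set by a precomputed trigger dictionary plus a single pass over the input that records the highest triggering level per prefix, followed by one fill loop per prefix; the inner membership scans of the evolving set disappear.
import Mathlib
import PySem

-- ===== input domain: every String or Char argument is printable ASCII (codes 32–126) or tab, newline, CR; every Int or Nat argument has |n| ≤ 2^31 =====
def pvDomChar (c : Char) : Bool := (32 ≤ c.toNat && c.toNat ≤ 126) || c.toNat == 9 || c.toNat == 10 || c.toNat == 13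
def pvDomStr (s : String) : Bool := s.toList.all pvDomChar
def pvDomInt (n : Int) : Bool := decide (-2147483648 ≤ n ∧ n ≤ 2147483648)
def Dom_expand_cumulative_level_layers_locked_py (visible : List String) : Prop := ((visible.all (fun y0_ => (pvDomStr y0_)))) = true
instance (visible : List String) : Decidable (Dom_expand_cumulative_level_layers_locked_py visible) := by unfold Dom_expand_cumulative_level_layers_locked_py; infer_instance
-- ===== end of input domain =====

-- B replaces A's descending membership-test-and-fill nested loops by a precomputed
-- trigger dictionary, a single max-recording pass over the input, and one fill loop
-- per prefix (objective: alternative decomposition, same cost).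

-- the three fixed prefixes both versions use
def pvPrefixes : List String :=
  ["Sila_nacisku-LVL", "Predkosc-LVL", "Predkosc_masazu_stop-LVL"]

-- ===== PORT A =====
-- body of A's outer loop: for level in range(3,0,-1): if label in expanded: fill range(1,level)
def pvStepA (expanded : PySem.Set String) (pfx : String) : PySem.Set String :=
  (PySem.List.pyRange 3 0 (-1)).foldl
    (fun expanded level =>
      let label := pfx ++ PySem.Int.toStr level
      if PySem.Set.contains expanded label then
        (PySem.List.pyRange 1 level 1).foldl
          (fun expanded fill => PySem.Set.add expanded (pfx ++ PySem.Int.toStr fill)) expanded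
      else expanded)
    expanded

def expand_cumulative_level_layers_locked_py (visible : List String) : List String :=
  pvPrefixes.foldl pvStepA (PySem.Set.ofList visible)

-- ===== PORT B =====
-- _TRIGGERS = {f"{p}{lvl}": (p, lvl) for p in _PREFIXES for lvl in (2, 3)}
def pvTriggers : PySem.Dict String (String × Int) :=
  pvPrefixes.foldl
    (fun d p => ([2, 3] : List Int).foldl
      (fun d lvl => d.insert (p ++ PySem.Int.toStr lvl) (p, lvl)) d)
    PySem.Dict.empty

-- loop body: hit = _TRIGGERS.get(label); if hit: p,lvl = hit; if lvl > top.get(p,0): top[p] = lvl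
def pvTopStep (top : PySem.Dict String Int) (label : String) : PySem.Dict String Int :=
  match pvTriggers.get? label with
  | some (p, lvl) => if lvl > top.getD p 0 then top.insert p lvl else top
  | none => top

def pvTop (visible : List String) : PySem.Dict String Int :=
  visible.foldl pvTopStep PySem.Dict.empty

def expand_cumulative_level_layers_locked_py_alt (visible : List String) : List String :=
  let top := pvTop visible
  pvPrefixes.foldl
    (fun expanded p =>
      (PySem.List.pyRange 1 (top.getD p 0) 1).foldl
        (fun expanded fill => PySem.Set.add expanded (p ++ PySem.Int.toStr fill)) expanded)
    (PySem.Set.ofList visible)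

-- ===== PRECONDITION & SPEC =====
def Spec_expand_cumulative_level_layers_locked_py (visible : List String) (out : List String) : Prop := out = expand_cumulative_level_layers_locked_py_alt visible
instance (visible : List String) (out : List String) : Decidable (Spec_expand_cumulative_level_layers_locked_py visible out) := by unfold Spec_expand_cumulative_level_layers_locked_py; infer_instance

-- ===== CLAIM (what is proved, stated in full; the proofs are below) =====
def Claim_equal_expand_cumulative_level_layers_locked_py : Prop := ∀ (visible : List String), Dom_expand_cumulative_level_layers_locked_py visible → Spec_expand_cumulative_level_layers_locked_py visible (expand_cumulative_level_layers_locked_py visible)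

-- ===== LEMMAS AND PROOFS =====

-- the trigger dict as a literal
theorem pvTriggers_eq : pvTriggers = PySem.Dict.mk
    [("Sila_nacisku-LVL2", ("Sila_nacisku-LVL", 2)),
     ("Sila_nacisku-LVL3", ("Sila_nacisku-LVL", 3)),
     ("Predkosc-LVL2", ("Predkosc-LVL", 2)),
     ("Predkosc-LVL3", ("Predkosc-LVL", 3)),
     ("Predkosc_masazu_stop-LVL2", ("Predkosc_masazu_stop-LVL", 2)),
     ("Predkosc_masazu_stop-LVL3", ("Predkosc_masazu_stop-LVL", 3))] := by
  decide

-- any hit of the trigger dict is one of the six trigger labels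
theorem pvTrig_sound {l q : String} {lvl : Int}
    (h : pvTriggers.get? l = some (q, lvl)) :
    q ++ PySem.Int.toStr lvl = l ∧ q ∈ pvPrefixes ∧ (lvl = 2 ∨ lvl = 3) := by
  rw [pvTriggers_eq] at h
  simp only [PySem.Dict.get?_mk_cons, beq_iff_eq] at h
  split_ifs at h with h1 h2 h3 h4 h5 h6 <;>
    [skip; skip; skip; skip; skip; skip;
     exact absurd h (by simp [show PySem.Dict.mk ([] : List (String × (String × Int))) = PySem.Dict.empty from rfl, PySem.Dict.get?_empty])] <;>
    (simp only [Option.some_inj, Prod.mk.injEq] at h; obtain ⟨rfl, rfl⟩ := h) <;>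
    refine ⟨by rw [← ‹_ = l›]; rfl, by decide, by decide⟩

-- the max-recording pass, characterised per prefix
theorem pvTop_char (p : String) (hp : p ∈ pvPrefixes) (visible : List String) :
    ∀ (t : PySem.Dict String Int),
      ((visible.foldl pvTopStep t).getD p 0) =
        if (p ++ "3") ∈ visible then max (t.getD p 0) 3
        else if (p ++ "2") ∈ visible then max (t.getD p 0) 2
        else t.getD p 0 := by
  have h2 : pvTriggers.get? (p ++ "2") = some (p, 2) := by
    simp [pvPrefixes] at hp; rcases hp with rfl | rfl | rfl <;> decide
  have h3 : pvTriggers.get? (p ++ "3") = some (p, 3) := by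
    simp [pvPrefixes] at hp; rcases hp with rfl | rfl | rfl <;> decide
  have hne : p ++ "2" ≠ p ++ "3" := by
    simp [pvPrefixes] at hp; rcases hp with rfl | rfl | rfl <;> decide
  induction visible with
  | nil => intro t; simp
  | cons l rest ih =>
    intro t
    simp only [List.foldl_cons]
    rw [ih]
    by_cases e3 : l = p ++ "3"
    · subst e3
      have hs : pvTopStep t (p ++ "3") =
          if 3 > t.getD p 0 then t.insert p 3 else t := by
        simp [pvTopStep, h3]
      have hg : (if (3 : Int) > t.getD p 0 then t.insert p 3 else t).getD p 0
          = max (t.getD p 0) 3 := by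
        by_cases hc : (3 : Int) > t.getD p 0 <;>
          simp [hc, PySem.Dict.getD_insert_self] <;> omega
      rw [hs, hg]
      have mm : (p ++ "3") ∈ (p ++ "3") :: rest := List.mem_cons_self
      simp only [if_pos mm]
      split_ifs <;> omega
    · by_cases e2 : l = p ++ "2"
      · subst e2
        have hs : pvTopStep t (p ++ "2") =
            if 2 > t.getD p 0 then t.insert p 2 else t := by
          simp [pvTopStep, h2]
        have hg : (if (2 : Int) > t.getD p 0 then t.insert p 2 else t).getD p 0
            = max (t.getD p 0) 2 := by
          by_cases hc : (2 : Int) > t.getD p 0 <;>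
            simp [hc, PySem.Dict.getD_insert_self] <;> omega
        have m3 : ((p ++ "3") ∈ (p ++ "2") :: rest) ↔ (p ++ "3") ∈ rest :=
          ⟨fun h => by
            rcases List.mem_cons.mp h with h | h
            · exact absurd h.symm e3
            · exact h,
           fun h => List.mem_cons_of_mem _ h⟩
        have mm : (p ++ "2") ∈ (p ++ "2") :: rest := List.mem_cons_self
        rw [hs, hg]
        simp only [m3, if_pos mm]
        split_ifs <;> omega
      · have hstep : (pvTopStep t l).getD p 0 = t.getD p 0 := by
          unfold pvTopStep
          cases hq : pvTriggers.get? l with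
          | none => rfl
          | some pr =>
            obtain ⟨q, lvl⟩ := pr
            obtain ⟨hl, hqmem, hlv⟩ := pvTrig_sound hq
            have hqp : p ≠ q := by
              rintro rfl
              rcases hlv with rfl | rfl
              · exact e2 (by rw [← hl]; rfl)
              · exact e3 (by rw [← hl]; rfl)
            by_cases hc : lvl > t.getD q 0 <;>
              simp [hc, PySem.Dict.getD_insert, hqp]
        rw [hstep]
        have m3 : ((p ++ "3") ∈ l :: rest) ↔ (p ++ "3") ∈ rest :=
          ⟨fun h => by
            rcases List.mem_cons.mp h with h | h
            · exact absurd h.symm e3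
            · exact h,
           fun h => List.mem_cons_of_mem _ h⟩
        have m2 : ((p ++ "2") ∈ l :: rest) ↔ (p ++ "2") ∈ rest :=
          ⟨fun h => by
            rcases List.mem_cons.mp h with h | h
            · exact absurd h.symm e2
            · exact h,
           fun h => List.mem_cons_of_mem _ h⟩
        simp only [m3, m2]

-- the final per-prefix maximum as a function of the input only
theorem pvTop_val (p : String) (hp : p ∈ pvPrefixes) (visible : List String) :
    (pvTop visible).getD p 0 =
      if (p ++ "3") ∈ visible then 3
      else if (p ++ "2") ∈ visible then 2
      else 0 := by
  unfold pvTop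
  rw [pvTop_char p hp visible PySem.Dict.empty]
  simp [PySem.Dict.getD_empty]

-- A's loop body, characterised: add the layers below the highest present level
theorem pvStepA_char (exp : PySem.Set String) (p : String) :
    pvStepA exp p =
      if (p ++ "3") ∈ exp then
        PySem.Set.add (PySem.Set.add exp (p ++ "1")) (p ++ "2")
      else if (p ++ "2") ∈ exp then PySem.Set.add exp (p ++ "1")
      else exp := by
  unfold pvStepA
  have r31 : PySem.List.pyRange 3 0 (-1) = [3, 2, 1] := by decide
  have r13 : PySem.List.pyRange 1 3 1 = [1, 2] := by decide
  have r12 : PySem.List.pyRange 1 2 1 = [1] := by decide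
  have r11 : PySem.List.pyRange 1 1 1 = [] := by decide
  have t1 : PySem.Int.toStr 1 = "1" := by decide
  have t2 : PySem.Int.toStr 2 = "2" := by decide
  have t3 : PySem.Int.toStr 3 = "3" := by decide
  by_cases h3 : (p ++ "3") ∈ exp <;> by_cases h2 : (p ++ "2") ∈ exp <;>
    simp [r31, r13, r12, r11, t1, t2, t3, List.foldl, h2, h3,
      PySem.Set.mem_add, PySem.Set.add_of_mem]

-- ===== VERDICT (by name: the statement is the Claim_ definition above) =====
theorem expand_cumulative_level_layers_locked_py_spec : Claim_equal_expand_cumulative_level_layers_locked_py := by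
  intro visible _
  unfold Spec_expand_cumulative_level_layers_locked_py
  unfold expand_cumulative_level_layers_locked_py expand_cumulative_level_layers_locked_py_alt
  simp only [pvPrefixes, List.foldl]
  rw [pvStepA_char, pvStepA_char, pvStepA_char,
      pvTop_val _ (by decide) visible, pvTop_val _ (by decide) visible,
      pvTop_val _ (by decide) visible]
  have r13 : PySem.List.pyRange 1 3 1 = [1, 2] := by decide
  have r12 : PySem.List.pyRange 1 2 1 = [1] := by decide
  have r10 : PySem.List.pyRange 1 0 1 = [] := by decide
  have t1 : PySem.Int.toStr 1 = "1" := by decide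
  have t2 : PySem.Int.toStr 2 = "2" := by decide
  by_cases hA3 : ("Sila_nacisku-LVL3" : String) ∈ visible <;>
  by_cases hA2 : ("Sila_nacisku-LVL2" : String) ∈ visible <;>
  by_cases hB3 : ("Predkosc-LVL3" : String) ∈ visible <;>
  by_cases hB2 : ("Predkosc-LVL2" : String) ∈ visible <;>
  by_cases hC3 : ("Predkosc_masazu_stop-LVL3" : String) ∈ visible <;>
  by_cases hC2 : ("Predkosc_masazu_stop-LVL2" : String) ∈ visible <;>
    simp [hA3, hA2, hB3, hB2, hC3, hC2, r13, r12, r10, t1, t2,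
      PySem.Set.mem_add, PySem.Set.mem_ofList, List.foldl]
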